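-- pv_equiv track=rewrite | github.com/NAIST-Archlab/qimax-soft | sojo/utils.py | create_zip_chain
-- ===== SOURCE A (Python) =====
-- def create_zip_chain(num_operators, num_xoperators, is_cx_first):
--     """Create list 0,1,0,1,...
--     If is_cx_first is True, then 1 is first, else 0 is first
--     Args:
--         n (_type_): _description_
--         m (_type_): _description_
--         is_cx_first (bool): _description_
--
--     Returns:
--         _type_: _description_
--     """
--     result = []
--     while num_operators > 0 or num_xoperators > 0:
--         if is_cx_first:
--             if num_xoperators > 0:
--                 result.append(1)
--                 num_xoperators -= 1
--             if num_operators > 0: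
--                 result.append(0)
--                 num_operators -= 1
--         else:
--             if num_operators > 0:
--                 result.append(0)
--                 num_operators -= 1
--             if num_xoperators > 0:
--                 result.append(1)
--                 num_xoperators -= 1
--     return result
-- ===== SOURCE B (Python) =====
-- def create_zip_chain(num_operators, num_xoperators, is_cx_first):
--     n = max(0, num_operators)
--     m = max(0, num_xoperators)
--     first, second = (1, 0) if is_cx_first else (0, 1)
--     k = min(n, m)
--     result = [first, second] * k
--     if m > n:
--         result += [1] * (m - n)
--     elif n > m:
--         result += [0] * (n - m)
--     return result
-- ===== Notes on version B (the rewrite author's own statement) =====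
-- stated objective: simpler
-- what changed: Replaces the decrementing while-loop that appends one element per step with a closed-form construction: the interleaved pair block [first,second]*min(n,m) plus a homogeneous tail of the surplus count.
import Mathlib
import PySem

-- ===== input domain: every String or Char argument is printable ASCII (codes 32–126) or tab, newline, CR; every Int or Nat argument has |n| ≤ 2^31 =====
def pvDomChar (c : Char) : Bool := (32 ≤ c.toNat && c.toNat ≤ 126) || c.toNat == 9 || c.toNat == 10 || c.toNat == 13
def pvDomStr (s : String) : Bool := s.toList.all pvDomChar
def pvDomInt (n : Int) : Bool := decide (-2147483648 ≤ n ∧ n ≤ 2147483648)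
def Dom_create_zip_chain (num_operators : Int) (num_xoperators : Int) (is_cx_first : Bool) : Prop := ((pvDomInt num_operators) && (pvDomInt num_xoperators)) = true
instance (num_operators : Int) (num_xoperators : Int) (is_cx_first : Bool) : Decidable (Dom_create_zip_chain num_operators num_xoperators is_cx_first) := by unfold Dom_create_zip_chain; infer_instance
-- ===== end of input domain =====

-- B replaces the element-by-element while-loop with a closed-form pair block plus homogeneous tail (objective: simpler).
-- ===== PORT A =====
-- literal port of A's while-loop: per iteration, conditionally append 1/0 and decrement, in A's branch order
def czc_loop (num_operators : Int) (num_xoperators : Int) (is_cx_first : Bool) (result : List Int) : List Int :=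
  if num_operators > 0 ∨ num_xoperators > 0 then
    if is_cx_first then
      czc_loop (if num_operators > 0 then num_operators - 1 else num_operators)
        (if num_xoperators > 0 then num_xoperators - 1 else num_xoperators) is_cx_first
        ((if num_xoperators > 0 then result ++ [1] else result) ++ (if num_operators > 0 then [0] else []))
    else
      czc_loop (if num_operators > 0 then num_operators - 1 else num_operators)
        (if num_xoperators > 0 then num_xoperators - 1 else num_xoperators) is_cx_first
        ((if num_operators > 0 then result ++ [0] else result) ++ (if num_xoperators > 0 then [1] else []))
  else result
termination_by num_operators.toNat + num_xoperators.toNat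
decreasing_by all_goals (split_ifs <;> omega)

def create_zip_chain (num_operators : Int) (num_xoperators : Int) (is_cx_first : Bool) : List Int :=
  czc_loop num_operators num_xoperators is_cx_first []

-- ===== PORT B =====
def create_zip_chain_alt (num_operators : Int) (num_xoperators : Int) (is_cx_first : Bool) : List Int :=
  let n := max 0 num_operators
  let m := max 0 num_xoperators
  let fs : Int × Int := if is_cx_first then (1, 0) else (0, 1)
  let k := min n m
  let result := (List.replicate k.toNat [fs.1, fs.2]).flatten
  if m > n then result ++ List.replicate (m - n).toNat 1
  else if n > m then result ++ List.replicate (n - m).toNat 0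
  else result

-- ===== PRECONDITION & SPEC =====
def Spec_create_zip_chain (num_operators : Int) (num_xoperators : Int) (is_cx_first : Bool) (out : List Int) : Prop := out = create_zip_chain_alt num_operators num_xoperators is_cx_first
instance (num_operators : Int) (num_xoperators : Int) (is_cx_first : Bool) (out : List Int) : Decidable (Spec_create_zip_chain num_operators num_xoperators is_cx_first out) := by unfold Spec_create_zip_chain; infer_instance

-- ===== CLAIM (what is proved, stated in full; the proofs are below) =====
def Claim_equal_create_zip_chain : Prop := ∀ (num_operators : Int) (num_xoperators : Int) (is_cx_first : Bool), Dom_create_zip_chain num_operators num_xoperators is_cx_first → Spec_create_zip_chain num_operators num_xoperators is_cx_first (create_zip_chain num_operators num_xoperators is_cx_first)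

-- ===== LEMMAS AND PROOFS =====


-- proof-only helper: the closed form re-expressed over Nat counts
def pvBlocks (a b : Nat) (c : Bool) : List Int :=
  (List.replicate (min a b) (if c then [(1:Int), 0] else [0, 1])).flatten
    ++ List.replicate (b - a) (1:Int) ++ List.replicate (a - b) (0:Int)

theorem alt_eq_blocks (n m : Int) (c : Bool) :
    create_zip_chain_alt n m c = pvBlocks n.toNat m.toNat c := by
  unfold create_zip_chain_alt pvBlocks
  rcases c <;> simp only [] <;> split_ifs with h1 h2 <;>
    · rw [show (min (max 0 n) (max 0 m)).toNat = min n.toNat m.toNat by omega]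
      first
      | (rw [show (max 0 m - max 0 n).toNat = m.toNat - n.toNat by omega,
             show n.toNat - m.toNat = 0 by omega]; simp)
      | (rw [show (max 0 n - max 0 m).toNat = n.toNat - m.toNat by omega,
             show m.toNat - n.toNat = 0 by omega]; simp)
      | (rw [show m.toNat - n.toNat = 0 by omega, show n.toNat - m.toNat = 0 by omega]; simp)

theorem blocks_zero (c : Bool) : pvBlocks 0 0 c = [] := by simp [pvBlocks]

theorem blocks_succ_succ (a b : Nat) (c : Bool) :
    pvBlocks (a + 1) (b + 1) c = (if c then [(1:Int), 0] else [0, 1]) ++ pvBlocks a b c := by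
  simp [pvBlocks, Nat.succ_min_succ, List.replicate_succ, Nat.succ_sub_succ]

theorem blocks_succ_zero (a : Nat) (c : Bool) :
    pvBlocks (a + 1) 0 c = 0 :: pvBlocks a 0 c := by
  simp [pvBlocks, List.replicate_succ]

theorem blocks_zero_succ (b : Nat) (c : Bool) :
    pvBlocks 0 (b + 1) c = 1 :: pvBlocks 0 b c := by
  simp [pvBlocks, List.replicate_succ]

theorem czc_loop_eq (k : Nat) : ∀ (n m : Int) (c : Bool) (acc : List Int),
    n.toNat + m.toNat ≤ k → czc_loop n m c acc = acc ++ pvBlocks n.toNat m.toNat c := by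
  induction k with
  | zero =>
    intro n m c acc h
    rw [czc_loop, if_neg (by omega)]
    rw [show n.toNat = 0 by omega, show m.toNat = 0 by omega, blocks_zero, List.append_nil]
  | succ k ih =>
    intro n m c acc h
    rw [czc_loop]
    by_cases hnm : n > 0 ∨ m > 0
    · rw [if_pos hnm]
      by_cases hn : n > 0 <;> by_cases hm : m > 0
      · rcases c <;>
          (simp only [hn, hm, if_true, if_false, Bool.false_eq_true]
           rw [ih (n-1) (m-1) _ _ (by omega),
               show n.toNat = (n-1).toNat + 1 by omega, show m.toNat = (m-1).toNat + 1 by omega,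
               blocks_succ_succ]
           simp)
      · rcases c <;>
          (simp only [hn, hm, if_true, if_false, Bool.false_eq_true]
           rw [ih (n-1) m _ _ (by omega),
               show n.toNat = (n-1).toNat + 1 by omega, show m.toNat = 0 by omega,
               blocks_succ_zero]
           simp)
      · rcases c <;>
          (simp only [hn, hm, if_true, if_false, Bool.false_eq_true]
           rw [ih n (m-1) _ _ (by omega),
               show m.toNat = (m-1).toNat + 1 by omega, show n.toNat = 0 by omega,
               blocks_zero_succ]
           simp)
      · omega
    · rw [if_neg hnm]
      rw [show n.toNat = 0 by omega, show m.toNat = 0 by omega, blocks_zero, List.append_nil]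

-- ===== VERDICT (by name: the statement is the Claim_ definition above) =====
theorem create_zip_chain_spec : Claim_equal_create_zip_chain := by
  intro n m c _
  unfold Spec_create_zip_chain create_zip_chain
  rw [czc_loop_eq (n.toNat + m.toNat) n m c [] le_rfl, List.nil_append, alt_eq_blocks]
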